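-- pv_equiv track=rewrite | github.com/0xPuddi/Algorithms | src/algos/better_algo_285.py | better_x
-- ===== SOURCE A (Python) =====
-- def better_x(A: list[int], B: list[int]):
--     x = 0
--
--     acc = 0
--     for i in range(len(A)):
--         if B[i] < A[i]:
--             acc += 1
--         else:
--             acc = 0
--
--         if x < acc:
--             x = acc
--
--     return x
-- ===== SOURCE B (Python) =====
-- def better_x(A: list[int], B: list[int]):
--     flags = [B[i] < A[i] for i in range(len(A))]
--     best = 0
--     while flags:
--         try:
--             j = flags.index(False)
--         except ValueError:
--             j = len(flags)
--         if best < j: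
--             best = j
--         flags = flags[j + 1:]
--     return best
-- ===== Notes on version B (the rewrite author's own statement) =====
-- stated objective: alternative
-- what changed: B materialises the comparison flags once and then consumes them run by run (jump to the first False with list.index, take the whole True-run length at once, slice past it), instead of A's per-element accumulator-with-running-max loop.
import Mathlib
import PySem

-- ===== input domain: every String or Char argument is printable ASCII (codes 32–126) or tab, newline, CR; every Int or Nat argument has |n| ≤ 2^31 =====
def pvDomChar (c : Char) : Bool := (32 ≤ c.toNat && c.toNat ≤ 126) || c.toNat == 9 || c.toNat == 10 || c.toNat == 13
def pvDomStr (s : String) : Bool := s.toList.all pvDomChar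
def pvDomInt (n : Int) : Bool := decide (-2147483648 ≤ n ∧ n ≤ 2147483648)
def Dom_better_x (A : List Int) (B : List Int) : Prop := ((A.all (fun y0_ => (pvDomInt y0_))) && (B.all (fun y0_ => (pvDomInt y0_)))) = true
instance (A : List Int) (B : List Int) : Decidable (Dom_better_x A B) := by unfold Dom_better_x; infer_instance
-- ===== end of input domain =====

-- B consumes the flag list run by run (index of first False, slice past it) instead of A's
-- per-element accumulator loop; same O(n) cost, different decomposition.

-- ===== PORT A =====
def better_x (A : List Int) (B : List Int) : Int :=
  (((PySem.List.pyRange 0 A.length 1).foldl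
      (fun (s : Int × Int) i =>
        let acc := if PySem.List.pyGetD B i 0 < PySem.List.pyGetD A i 0 then s.2 + 1 else 0
        (if s.1 < acc then acc else s.1, acc))
      (0, 0))).1

-- ===== PORT B =====
-- Source B's while-loop over the shrinking flag list, as the obvious recursion on the list.
-- flags[j+1:] with j+1 ≥ 0 is exactly List.drop (j+1).
def bGo : List Bool → Int → Int
  | [], best => best
  | f :: fs, best =>
    let flags := f :: fs
    let j : Nat := (PySem.List.index? flags false).getD flags.length
    bGo (flags.drop (j + 1)) (if best < (j : Int) then (j : Int) else best)
termination_by flags _ => flags.length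
decreasing_by simp

def better_x_alt (A : List Int) (B : List Int) : Int :=
  let flags := (PySem.List.pyRange 0 A.length 1).map
    (fun i => decide (PySem.List.pyGetD B i 0 < PySem.List.pyGetD A i 0))
  bGo flags 0

-- ===== PRECONDITION & SPEC =====
-- Pre_ excludes exactly the inputs where Python A raises IndexError (B shorter than A); B raises there too.
def Pre_better_x (A : List Int) (B : List Int) : Prop := A.length ≤ B.length
instance (A : List Int) (B : List Int) : Decidable (Pre_better_x A B) := by unfold Pre_better_x; infer_instance
def pvWitness_better_x : List Int × List Int := ([1, 2, 0], [0, 5, -1])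

def Spec_better_x (A : List Int) (B : List Int) (out : Int) : Prop := out = better_x_alt A B
instance (A : List Int) (B : List Int) (out : Int) : Decidable (Spec_better_x A B out) := by unfold Spec_better_x; infer_instance

-- ===== CLAIM (what is proved, stated in full; the proofs are below) =====
def Claim_equal_better_x : Prop := ∀ (A : List Int) (B : List Int), Dom_better_x A B → Pre_better_x A B → Spec_better_x A B (better_x A B)

-- ===== LEMMAS AND PROOFS =====

-- A's loop body, over a precomputed flag.
def stepA (s : Int × Int) (f : Bool) : Int × Int :=
  let acc := if f then s.2 + 1 else 0
  (if s.1 < acc then acc else s.1, acc)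

lemma foldl_stepA_replicate (j : Nat) : ∀ (x acc : Int), acc ≤ x →
    (List.replicate j true).foldl stepA (x, acc) = (max x (acc + j), acc + j) := by
  induction j with
  | zero =>
    intro x acc h
    simp only [List.replicate_zero, List.foldl_nil, Nat.cast_zero, add_zero, max_eq_left h]
  | succ j ih =>
    intro x acc h
    rw [List.replicate_succ, List.foldl_cons]
    have hstep : stepA (x, acc) true = (max x (acc + 1), acc + 1) := by
      simp only [stepA, if_true, Int.max_def]
      rw [Prod.mk.injEq]
      refine ⟨?_, rfl⟩
      split_ifs <;> omega
    rw [hstep, ih (max x (acc + 1)) (acc + 1) (le_max_right _ _), Prod.mk.injEq]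
    constructor
    · simp only [Int.max_def]; push_cast; split_ifs <;> omega
    · push_cast; ring

lemma mainLemma : ∀ (n : Nat) (flags : List Bool), flags.length ≤ n → ∀ (x : Int), 0 ≤ x →
    (flags.foldl stepA (x, 0)).1 = bGo flags x := by
  intro n
  induction n with
  | zero =>
    intro flags hlen x _
    have hnil : flags = [] := List.eq_nil_of_length_eq_zero (Nat.le_zero.mp hlen)
    subst hnil
    rw [bGo]; simp
  | succ n ih =>
    intro flags hlen x hx
    cases flags with
    | nil => rw [bGo]; simp
    | cons f fs =>
      rcases h : PySem.List.index? (f :: fs) false with _ | j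
      · -- no False in the list: it is one whole True-run
        have hmem : false ∉ (f :: fs) := (PySem.List.index?_eq_none_iff _ _).mp h
        have hrep : f :: fs = List.replicate (f :: fs).length true := by
          apply List.eq_replicate_of_mem
          intro b hb
          cases b
          · exact absurd hb hmem
          · rfl
        rw [bGo]
        simp only [h, Option.getD_none]
        rw [List.drop_eq_nil_of_le (by omega), bGo]
        conv_lhs => rw [hrep]
        rw [foldl_stepA_replicate _ x 0 hx]
        simp only [zero_add, Int.max_def]
        split_ifs <;> omega
      · -- first False at index j: f :: fs = replicate j true ++ false :: rest
        obtain ⟨pre, rest, hsplit, hprelen, hpremem⟩ := (PySem.List.index?_eq_some_iff _ _ _).mp h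
        have hpre : pre = List.replicate j true := by
          have h2 : pre = List.replicate pre.length true := by
            apply List.eq_replicate_of_mem
            intro b hb
            cases b
            · exact absurd hb hpremem
            · rfl
          rw [hprelen] at h2
          exact h2
        have hlenrest : rest.length ≤ n := by
          have hl := congrArg List.length hsplit
          simp at hl
          simp at hlen
          omega
        have hdrop : (f :: fs).drop (j + 1) = rest := by
          rw [hsplit, hpre, show List.replicate j true ++ false :: rest
              = (List.replicate j true ++ [false]) ++ rest by simp]
          have hl : (List.replicate j true ++ [false]).length = j + 1 := by simp
          rw [← hl, List.drop_left]
        rw [bGo]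
        simp only [h, Option.getD_some, hdrop]
        conv_lhs => rw [hsplit, hpre]
        rw [List.foldl_append, foldl_stepA_replicate j x 0 hx, List.foldl_cons]
        have hfalse : stepA (max x (0 + j), 0 + j) false = (max x (0 + j), 0) := by
          simp only [stepA, Bool.false_eq_true, if_false, zero_add]
          rw [Prod.mk.injEq]
          refine ⟨?_, rfl⟩
          simp only [Int.max_def]
          split_ifs <;> omega
        rw [hfalse, ih rest hlenrest (max x (0 + j)) (le_trans hx (le_max_left _ _))]
        congr 1
        simp only [zero_add, Int.max_def]
        split_ifs <;> omega

lemma better_x_eq_fold (A B : List Int) :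
    better_x A B = (((PySem.List.pyRange 0 A.length 1).map
      (fun i => decide (PySem.List.pyGetD B i 0 < PySem.List.pyGetD A i 0))).foldl stepA (0, 0)).1 := by
  unfold better_x
  rw [List.foldl_map]
  have hf : (fun (s : Int × Int) (i : Int) =>
      let acc := if PySem.List.pyGetD B i 0 < PySem.List.pyGetD A i 0 then s.2 + 1 else 0
      ((if s.1 < acc then acc else s.1 : Int), acc))
      = (fun (s : Int × Int) (i : Int) =>
          stepA s (decide (PySem.List.pyGetD B i 0 < PySem.List.pyGetD A i 0))) := by
    funext s i
    simp [stepA]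
  rw [hf]

-- ===== VERDICT (by name: the statement is the Claim_ definition above) =====
theorem better_x_spec : Claim_equal_better_x := by
  intro A B _ _
  unfold Spec_better_x better_x_alt
  rw [better_x_eq_fold]
  exact mainLemma _ _ le_rfl 0 le_rfl
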